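-- pv_equiv track=rewrite | github.com/junkeon/programmers | day015/prob040.py | solution
-- ===== SOURCE A (Python) =====
-- def solution(n):
--     d = {0:'1', 1:'2', 2:'4'}
--
--     answer = ''
--     c = 0
--     while n >= 3**c:
--         n -= 3**c
--         answer += d[n//3**c%3]
--         c += 1
--
--     return answer[::-1]
-- ===== SOURCE B (Python) =====
-- def solution(n):
--     answer = ''
--     while n > 0:
--         r = n % 3
--         if r == 1:
--             answer = '1' + answer
--             n = n // 3
--         elif r == 2:
--             answer = '2' + answer
--             n = n // 3
--         else:
--             answer = '4' + answer
--             n = n // 3 - 1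
--     return answer
-- ===== Notes on version B (the rewrite author's own statement) =====
-- stated objective: idiomatic
-- what changed: A repeatedly subtracts growing powers 3^c with a counter and reverses at the end; B is the standard bijective base-3 digit loop (r = n % 3, borrow n//3 - 1 on r == 0) that prepends digits so no reversal is needed.
import Mathlib
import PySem

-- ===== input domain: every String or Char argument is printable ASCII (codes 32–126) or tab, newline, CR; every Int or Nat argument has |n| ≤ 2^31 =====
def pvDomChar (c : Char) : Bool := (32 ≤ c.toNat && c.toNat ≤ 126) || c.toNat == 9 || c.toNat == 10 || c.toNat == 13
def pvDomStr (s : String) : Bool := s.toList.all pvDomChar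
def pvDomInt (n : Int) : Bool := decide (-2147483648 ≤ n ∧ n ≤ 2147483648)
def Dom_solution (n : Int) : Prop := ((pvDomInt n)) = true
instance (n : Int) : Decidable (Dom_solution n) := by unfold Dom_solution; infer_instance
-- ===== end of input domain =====

-- B replaces A's subtract-3^c-with-counter loop by the standard bijective base-3 digit loop
-- (prepend digits, borrow on r == 0), so no power computation and no final reversal (objective: idiomatic).

-- ===== PORT A =====
-- the dict d = {0:'1', 1:'2', 2:'4'}
def solutionD : PySem.Dict Int String :=
  ((PySem.Dict.empty.insert 0 "1").insert 1 "2").insert 2 "4"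

-- the while loop; d[k] is ported as (get? k).getD "" — the key n//3**c%3 is always 0, 1 or 2,
-- a key of d, so the KeyError branch (the default) is unreachable
def solutionLoop (n : Int) (c : Nat) (acc : String) : String :=
  if (3:Int)^c ≤ n then
    solutionLoop (n - 3^c) (c+1)
      (acc ++ ((solutionD.get? (PySem.Int.mod (PySem.Int.floordiv (n - 3^c) ((3:Int)^c)) 3)).getD ""))
  else acc
termination_by n.toNat
decreasing_by
  have h1 : (0:Int) < 3 ^ c := pow_pos (by norm_num) c
  omega

def solution (n : Int) : String :=
  (PySem.Str.slice? (solutionLoop n 0 "") none none (-1)).getD ""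

-- ===== PORT B =====
def solutionAltLoop (n : Int) (acc : String) : String :=
  if 0 < n then
    let r := PySem.Int.mod n 3
    if r = 1 then solutionAltLoop (PySem.Int.floordiv n 3) ("1" ++ acc)
    else if r = 2 then solutionAltLoop (PySem.Int.floordiv n 3) ("2" ++ acc)
    else solutionAltLoop (PySem.Int.floordiv n 3 - 1) ("4" ++ acc)
  else acc
termination_by n.toNat
decreasing_by
  all_goals
    rw [PySem.Int.floordiv_eq_ediv_of_pos (by norm_num : (0:Int) < 3)]
    omega

def solution_alt (n : Int) : String := solutionAltLoop n ""

-- ===== PRECONDITION & SPEC =====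
def Spec_solution (n : Int) (out : String) : Prop := out = solution_alt n
instance (n : Int) (out : String) : Decidable (Spec_solution n out) := by unfold Spec_solution; infer_instance

-- ===== CLAIM (what is proved, stated in full; the proofs are below) =====
def Claim_equal_solution : Prop := ∀ (n : Int), Dom_solution n → Spec_solution n (solution n)

-- ===== LEMMAS AND PROOFS =====

-- the digit string A appends for residue r (proof abbreviation for the port's dict lookup)
def dig (r : Int) : String := (solutionD.get? r).getD ""

-- string reversal, the value of s[::-1]
def revStr (s : String) : String := String.ofList s.toList.reverse

theorem pow3_pos (c : Nat) : (0:Int) < 3 ^ c := pow_pos (by norm_num) c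

theorem fd_pos (a b : Int) (h : 0 < b) : PySem.Int.floordiv a b = a / b :=
  PySem.Int.floordiv_eq_ediv_of_pos h

theorem md_pos (a b : Int) (h : 0 < b) : PySem.Int.mod a b = a % b :=
  PySem.Int.mod_eq_emod_of_pos h

theorem loop_shift : ∀ (k : Nat) (n : Int), n.toNat ≤ k → ∀ (c : Nat) (acc : String),
    solutionLoop n (c+1) acc = solutionLoop (n / 3) c acc := by
  intro k
  induction k with
  | zero =>
    intro n hn c acc
    have h1 := pow3_pos c
    have h2 := pow3_pos (c+1)
    conv_lhs => rw [solutionLoop]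
    conv_rhs => rw [solutionLoop]
    rw [if_neg (by omega), if_neg (by omega)]
  | succ k ih =>
    intro n hn c acc
    have h1 := pow3_pos c
    have h3 : (3:Int)^(c+1) = 3 * 3^c := by ring
    by_cases h : (3:Int)^(c+1) ≤ n
    · conv_lhs => rw [solutionLoop]
      rw [if_pos h, ih (n - 3^(c+1)) (by omega) (c+1) _]
      conv_rhs => rw [solutionLoop]
      rw [if_pos (by omega : (3:Int)^c ≤ n / 3)]
      have e1 : (n - 3^(c+1)) / 3 = n / 3 - 3^c := by omega
      have e2 : PySem.Int.floordiv (n - 3^(c+1)) ((3:Int)^(c+1))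
          = PySem.Int.floordiv (n / 3 - 3^c) ((3:Int)^c) := by
        rw [fd_pos _ _ (pow3_pos (c+1)), fd_pos _ _ h1, ← e1, h3,
          ← Int.ediv_ediv_of_nonneg (by norm_num : (0:Int) ≤ 3)]
      rw [e1, e2]
    · conv_lhs => rw [solutionLoop]
      conv_rhs => rw [solutionLoop]
      rw [if_neg h, if_neg (by omega)]

theorem loopA_rec (n : Int) (acc : String) (h : 1 ≤ n) :
    solutionLoop n 0 acc = solutionLoop ((n-1)/3) 0 (acc ++ dig ((n-1) % 3)) := by
  conv_lhs => rw [solutionLoop]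
  rw [if_pos (by simpa using h)]
  rw [loop_shift (n-1).toNat (n - 3^0) (by simp) 0]
  simp only [pow_zero, fd_pos _ 1 one_pos, Int.ediv_one, md_pos _ 3 (by norm_num)]
  rfl

theorem loopA_acc : ∀ (k : Nat) (n : Int), n.toNat ≤ k → ∀ (acc : String),
    solutionLoop n 0 acc = acc ++ solutionLoop n 0 "" := by
  intro k
  induction k with
  | zero =>
    intro n hn acc
    conv_lhs => rw [solutionLoop]
    conv_rhs => rw [solutionLoop]
    rw [if_neg (by simp; omega), if_neg (by simp; omega)]
    simp
  | succ k ih =>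
    intro n hn acc
    by_cases h : 1 ≤ n
    · rw [loopA_rec n acc h, loopA_rec n "" h,
        ih ((n-1)/3) (by omega) (acc ++ dig ((n-1) % 3)),
        ih ((n-1)/3) (by omega) ("" ++ dig ((n-1) % 3))]
      simp [String.append_assoc]
    · conv_lhs => rw [solutionLoop]
      conv_rhs => rw [solutionLoop]
      rw [if_neg (by simp; omega), if_neg (by simp; omega)]
      simp

theorem loopB_rec (n : Int) (acc : String) (h : 1 ≤ n) :
    solutionAltLoop n acc = solutionAltLoop ((n-1)/3) (dig ((n-1) % 3) ++ acc) := by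
  conv_lhs => rw [solutionAltLoop]
  rw [if_pos (by omega)]
  simp only [md_pos _ 3 (by norm_num : (0:Int) < 3), fd_pos _ 3 (by norm_num : (0:Int) < 3)]
  have h3 : n % 3 = 0 ∨ n % 3 = 1 ∨ n % 3 = 2 := by omega
  rcases h3 with h0 | h1 | h2
  · rw [if_neg (by omega), if_neg (by omega)]
    have : (n-1)/3 = n/3 - 1 := by omega
    have hd : (n-1) % 3 = 2 := by omega
    rw [this, hd]
    rfl
  · rw [if_pos (by omega)]
    have : (n-1)/3 = n/3 := by omega
    have hd : (n-1) % 3 = 0 := by omega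
    rw [this, hd]
    rfl
  · rw [if_neg (by omega), if_pos (by omega)]
    have : (n-1)/3 = n/3 := by omega
    have hd : (n-1) % 3 = 1 := by omega
    rw [this, hd]
    rfl

theorem revStr_append (s t : String) : revStr (s ++ t) = revStr t ++ revStr s := by
  rw [revStr, revStr, revStr, String.toList_append, List.reverse_append, String.ofList_append]

theorem main_lemma : ∀ (k : Nat) (n : Int), n.toNat ≤ k → ∀ (acc : String),
    solutionAltLoop n acc = revStr (solutionLoop n 0 "") ++ acc := by
  intro k
  induction k with
  | zero =>
    intro n hn acc
    conv_lhs => rw [solutionAltLoop]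
    conv_rhs => rw [solutionLoop]
    rw [if_neg (by omega), if_neg (by simp; omega)]
    simp [revStr]
  | succ k ih =>
    intro n hn acc
    by_cases h : 1 ≤ n
    · rw [loopB_rec n acc h, ih ((n-1)/3) (by omega) _,
        loopA_rec n "" h, loopA_acc k ((n-1)/3) (by omega) ("" ++ dig ((n-1) % 3))]
      have hdig : revStr (dig ((n-1) % 3)) = dig ((n-1) % 3) := by
        have h3 : (n-1) % 3 = 0 ∨ (n-1) % 3 = 1 ∨ (n-1) % 3 = 2 := by omega
        rcases h3 with h0 | h0 | h0 <;> rw [h0] <;> rfl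
      rw [revStr_append, revStr_append, hdig]
      simp [revStr, String.append_assoc]
    · conv_lhs => rw [solutionAltLoop]
      conv_rhs => rw [solutionLoop]
      rw [if_neg (by omega), if_neg (by simp; omega)]
      simp [revStr]

-- ===== VERDICT (by name: the statement is the Claim_ definition above) =====
theorem solution_spec : Claim_equal_solution := by
  intro n _
  unfold Spec_solution
  rw [solution, solution_alt, PySem.Str.slice?_none_none_neg_one]
  rw [main_lemma n.toNat n le_rfl ""]
  simp [revStr]
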